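-- pv_equiv track=rewrite | github.com/endomorphosis/ipfs_datasets_py | ipfs_datasets_py/optimizers/tests/performance/profile_batch_264_extract_rule_based.py | generate_legal_text
-- ===== SOURCE A (Python) =====
-- def generate_legal_text(target_tokens: int = 5000) -> str:
--     """Generate a legal-style document with roughly target_tokens tokens."""
--     clauses = [
--         "The parties agree to the terms of this Agreement and all obligations herein.",
--         "Contractor shall provide services in a professional and timely manner.",
--         "Client shall pay fees within thirty days of receipt of invoice.",
--         "This Agreement may be terminated upon written notice by either party.",
--         "Confidential Information shall be protected using reasonable care.",
--     ]
--     parts = [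
--         "MASTER SERVICES AGREEMENT\n\n",
--         "This Agreement is made between Alpha Corp and Beta LLC.\n\n",
--     ]
--
--     current_tokens = len(" ".join(parts).split())
--     idx = 0
--     while current_tokens < target_tokens:
--         clause = clauses[idx % len(clauses)]
--         parts.append(f"{idx + 1}. {clause}\n")
--         idx += 1
--         current_tokens = len(" ".join(parts).split())
--
--     parts.append("\nIN WITNESS WHEREOF, the parties execute this Agreement.\n")
--     return "".join(parts)
-- ===== SOURCE B (Python) =====
-- def generate_legal_text(target_tokens: int = 5000) -> str:
--     """Generate a legal-style document with roughly target_tokens tokens."""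
--     clauses = [
--         "The parties agree to the terms of this Agreement and all obligations herein.",
--         "Contractor shall provide services in a professional and timely manner.",
--         "Client shall pay fees within thirty days of receipt of invoice.",
--         "This Agreement may be terminated upon written notice by either party.",
--         "Confidential Information shall be protected using reasonable care.",
--     ]
--     header = (
--         "MASTER SERVICES AGREEMENT\n\n"
--         "This Agreement is made between Alpha Corp and Beta LLC.\n\n"
--     )
--     # per-clause token contribution: the "N." numeral plus the clause's words
--     tok = [1 + len(c.split()) for c in clauses]
--     initial = len(header.split())
--     need = target_tokens - initial
--     if need <= 0:
--         k = 0
--     else: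
--         # whole cycles of all five clauses, then a partial cycle
--         cycle = sum(tok)
--         q, r = divmod(need - 1, cycle)
--         r += 1  # residual tokens still needed after q full cycles, 1..cycle
--         k = 5 * q
--         acc = 0
--         for t in tok:
--             k += 1
--             acc += t
--             if acc >= r:
--                 break
--     out = [header]
--     for i in range(k):
--         out.append(f"{i + 1}. {clauses[i % 5]}\n")
--     out.append("\nIN WITNESS WHEREOF, the parties execute this Agreement.\n")
--     return "".join(out)
-- ===== Notes on version B (the rewrite author's own statement) =====
-- stated objective: faster
-- what changed: Instead of appending clauses one at a time and re-joining/re-splitting the whole document to recount tokens after every append, B computes the exact number of clauses k needed by integer arithmetic (fixed per-clause token contributions, whole cycles via divmod, at most five more additions for the partial cycle) and then emits the k numbered clauses in one linear pass.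
import Mathlib
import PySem

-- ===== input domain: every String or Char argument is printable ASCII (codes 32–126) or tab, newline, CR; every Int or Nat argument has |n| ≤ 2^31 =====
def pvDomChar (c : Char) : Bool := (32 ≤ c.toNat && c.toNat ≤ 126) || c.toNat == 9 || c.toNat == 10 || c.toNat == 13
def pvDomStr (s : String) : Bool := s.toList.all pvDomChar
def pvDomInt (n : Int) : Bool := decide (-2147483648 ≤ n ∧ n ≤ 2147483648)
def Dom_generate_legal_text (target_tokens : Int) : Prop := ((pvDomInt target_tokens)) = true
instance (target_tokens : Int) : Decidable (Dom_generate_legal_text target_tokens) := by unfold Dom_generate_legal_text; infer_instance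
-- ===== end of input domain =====

-- B replaces A's append-one-clause-then-rejoin-and-recount-the-whole-document loop by an
-- arithmetic computation of the exact clause count followed by one linear emission pass (faster).

-- ===== PORT A =====
def pvClausesA : List String :=
  [ "The parties agree to the terms of this Agreement and all obligations herein.",
    "Contractor shall provide services in a professional and timely manner.",
    "Client shall pay fees within thirty days of receipt of invoice.",
    "This Agreement may be terminated upon written notice by either party.",
    "Confidential Information shall be protected using reasonable care." ]

def pvPartsInitA : List String :=
  [ "MASTER SERVICES AGREEMENT\n\n",
    "This Agreement is made between Alpha Corp and Beta LLC.\n\n" ]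

-- len(" ".join(parts).split())
def pvCountA (parts : List String) : Int :=
  ((PySem.Str.split₀ (PySem.Str.join " " parts)).length : Int)

-- the while loop; fuel is only a totality guard (each iteration strictly raises current
-- by at least 9 tokens, proved below, so fuel = target.toNat + 1 is never exhausted)
def pvLoopA (target : Int) : Nat → List String → Int → Int → List String
  | 0, parts, _, _ => parts
  | fuel + 1, parts, idx, current =>
    if current < target then
      -- clauses[idx % len(clauses)]: the index is always in range, the default "" is never used
      let clause := PySem.List.pyGetD pvClausesA (PySem.Int.mod idx (pvClausesA.length : Int)) ""
      let parts' := parts ++ [PySem.Int.toStr (idx + 1) ++ ". " ++ clause ++ "\n"]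
      pvLoopA target fuel parts' (idx + 1) (pvCountA parts')
    else parts

def generate_legal_text (target_tokens : Int) : String :=
  let parts := pvLoopA target_tokens (target_tokens.toNat + 1) pvPartsInitA 0 (pvCountA pvPartsInitA)
  PySem.Str.join "" (parts ++ ["\nIN WITNESS WHEREOF, the parties execute this Agreement.\n"])

-- ===== PORT B =====
def pvClausesB : List String :=
  [ "The parties agree to the terms of this Agreement and all obligations herein.",
    "Contractor shall provide services in a professional and timely manner.",
    "Client shall pay fees within thirty days of receipt of invoice.",
    "This Agreement may be terminated upon written notice by either party.",
    "Confidential Information shall be protected using reasonable care." ]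

def pvHeaderB : String :=
  "MASTER SERVICES AGREEMENT\n\nThis Agreement is made between Alpha Corp and Beta LLC.\n\n"

-- tok = [1 + len(c.split()) for c in clauses]
def pvTokB : List Int := pvClausesB.map (fun c => 1 + ((PySem.Str.split₀ c).length : Int))

-- for t in tok: k += 1; acc += t; if acc >= r: break
def pvPickB : List Int → Int → Int → Int → Int
  | [], k, _, _ => k
  | t :: rest, k, acc, r =>
    if r ≤ acc + t then k + 1 else pvPickB rest (k + 1) (acc + t) r

-- the clause count k of Source B
def pvKB (target : Int) : Int :=
  let initial : Int := ((PySem.Str.split₀ pvHeaderB).length : Int)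
  let need := target - initial
  if need ≤ 0 then 0
  else
    let cycle := pvTokB.sum
    let q := PySem.Int.floordiv (need - 1) cycle
    let r := PySem.Int.mod (need - 1) cycle + 1
    pvPickB pvTokB (5 * q) 0 r

def generate_legal_text_alt (target_tokens : Int) : String :=
  let k := pvKB target_tokens
  let out := [pvHeaderB] ++
    (PySem.List.pyRange 0 k).map (fun i =>
      PySem.Int.toStr (i + 1) ++ ". " ++
        PySem.List.pyGetD pvClausesB (PySem.Int.mod i 5) "" ++ "\n")
  PySem.Str.join "" (out ++ ["\nIN WITNESS WHEREOF, the parties execute this Agreement.\n"])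

-- ===== PRECONDITION & SPEC =====
def Spec_generate_legal_text (target_tokens : Int) (out : String) : Prop := out = generate_legal_text_alt target_tokens
instance (target_tokens : Int) (out : String) : Decidable (Spec_generate_legal_text target_tokens out) := by unfold Spec_generate_legal_text; infer_instance

-- ===== CLAIM (what is proved, stated in full; the proofs are below) =====
def Claim_equal_generate_legal_text : Prop := ∀ (target_tokens : Int), Dom_generate_legal_text target_tokens → Spec_generate_legal_text target_tokens (generate_legal_text target_tokens)

-- ===== LEMMAS AND PROOFS =====

-- word count of a character list, as Python's len(s.split())
def wcL (cs : List Char) : Nat := (PySem.Chars.split₀ cs).length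

-- token contribution of the i-th appended clause part ("N." numeral + clause words)
def tokN (i : Nat) : Nat := [14, 11, 12, 12, 9].getD (i % 5) 0

-- total clause-token contribution after k appended parts
def cumN : Nat → Nat
  | 0 => 0
  | k + 1 => cumN k + tokN k

-- the i-th appended clause part, indexed by a Nat
def pvPart (i : Nat) : String :=
  PySem.Int.toStr ((i : Int) + 1) ++ ". " ++ pvClausesA.getD (i % 5) "" ++ "\n"

-- A's parts list after k appended clause parts
def pvPartsK (k : Nat) : List String := pvPartsInitA ++ (List.range k).map pvPart

lemma tokN_ge : ∀ i, 9 ≤ tokN i := by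
  intro i
  rcases (by omega : i % 5 = 0 ∨ i % 5 = 1 ∨ i % 5 = 2 ∨ i % 5 = 3 ∨ i % 5 = 4) with h | h | h | h | h <;>
    simp [tokN, h]

lemma cumN_succ_ge (k : Nat) : cumN k ≤ cumN (k + 1) := by
  simp only [cumN]; omega

lemma cumN_mono : ∀ {j k : Nat}, j ≤ k → cumN j ≤ cumN k := by
  intro j k h
  induction h with
  | refl => exact le_rfl
  | step _ ih => exact le_trans ih (cumN_succ_ge _)

lemma cumN_ge : ∀ k, 9 * k ≤ cumN k := by
  intro k
  induction k with
  | zero => simp [cumN]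
  | succ k ih => have := tokN_ge k; simp only [cumN]; omega

lemma pvKNex (t : Int) : ∃ k : Nat, t ≤ 13 + (cumN k : Int) := by
  refine ⟨t.toNat, ?_⟩
  have := cumN_ge t.toNat
  omega

-- the least number of clause parts that reaches the target
def pvKN (t : Int) : Nat := Nat.find (pvKNex t)

lemma cumN_closed (k : Nat) : cumN k = 58 * (k / 5) + [0, 14, 25, 37, 49].getD (k % 5) 0 := by
  induction k with
  | zero => simp [cumN]
  | succ k ih =>
    rcases (by omega : k % 5 = 0 ∨ k % 5 = 1 ∨ k % 5 = 2 ∨ k % 5 = 3 ∨ k % 5 = 4) with h | h | h | h | h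
    · have h1 : (k + 1) / 5 = k / 5 := by omega
      have h2 : (k + 1) % 5 = 1 := by omega
      simp only [cumN, ih, tokN, h, h1, h2]; simp [List.getD] <;> omega
    · have h1 : (k + 1) / 5 = k / 5 := by omega
      have h2 : (k + 1) % 5 = 2 := by omega
      simp only [cumN, ih, tokN, h, h1, h2]; simp [List.getD] <;> omega
    · have h1 : (k + 1) / 5 = k / 5 := by omega
      have h2 : (k + 1) % 5 = 3 := by omega
      simp only [cumN, ih, tokN, h, h1, h2]; simp [List.getD] <;> omega
    · have h1 : (k + 1) / 5 = k / 5 := by omega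
      have h2 : (k + 1) % 5 = 4 := by omega
      simp only [cumN, ih, tokN, h, h1, h2]; simp [List.getD] <;> omega
    · have h1 : (k + 1) / 5 = k / 5 + 1 := by omega
      have h2 : (k + 1) % 5 = 0 := by omega
      simp only [cumN, ih, tokN, h, h1, h2]; simp [List.getD] <;> omega

lemma cumN_5q_add (q m : Nat) (hm : m ≤ 5) : cumN (5 * q + m) = 58 * q + cumN m := by
  rcases Nat.lt_or_ge m 5 with h | h
  · rw [cumN_closed (5 * q + m), cumN_closed m]
    have h1 : (5 * q + m) / 5 = q := by omega
    have h2 : (5 * q + m) % 5 = m := by omega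
    have h3 : m / 5 = 0 := by omega
    have h4 : m % 5 = m := by omega
    rw [h1, h2, h3, h4]; ring
  · have hm5 : m = 5 := by omega
    subst hm5
    rw [cumN_closed (5 * q + 5)]
    have h1 : (5 * q + 5) / 5 = q + 1 := by omega
    have h2 : (5 * q + 5) % 5 = 0 := by omega
    rw [h1, h2]
    have : cumN 5 = 58 := by decide
    rw [this]; simp; ring

-- ---- split₀ machinery ----

lemma go_acc (s : List Char) : ∀ cur acc,
    PySem.Chars.split₀.go s cur acc = acc.reverse ++ PySem.Chars.split₀.go s cur [] := by
  induction s with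
  | nil =>
    intro cur acc
    by_cases h : cur.isEmpty <;> simp [PySem.Chars.split₀.go, h]
  | cons c rest ih =>
    intro cur acc
    by_cases hs : PySem.Chars.isspace c
    · by_cases hc : cur.isEmpty
      · simp only [PySem.Chars.split₀.go, hs, hc, if_true]
        rw [ih [] acc]
      · simp only [PySem.Chars.split₀.go, hs, hc, if_true, if_false]
        rw [ih [] (cur.reverse :: acc), ih [] [cur.reverse]]
        simp
    · simp only [PySem.Chars.split₀.go, hs, Bool.false_eq_true, if_false]
      rw [ih (c :: cur) acc]

lemma go_nonws (w : List Char) (hw : ∀ c ∈ w, PySem.Chars.isspace c = false) :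
    ∀ (s cur : List Char) (acc : List (List Char)),
    PySem.Chars.split₀.go (w ++ s) cur acc = PySem.Chars.split₀.go s (w.reverse ++ cur) acc := by
  induction w with
  | nil => intro s cur acc; simp
  | cons c w ih =>
    intro s cur acc
    have hc : PySem.Chars.isspace c = false := hw c (by simp)
    simp only [List.cons_append, PySem.Chars.split₀.go, hc, Bool.false_eq_true, if_false]
    rw [ih (fun d hd => hw d (by simp [hd])) s (c :: cur) acc]
    simp

lemma wcL_word_dot (w cs : List Char) (hw : ∀ c ∈ w, PySem.Chars.isspace c = false) :
    wcL (w ++ '.' :: ' ' :: cs) = 1 + wcL cs := by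
  unfold wcL PySem.Chars.split₀
  rw [go_nonws w hw ('.' :: ' ' :: cs) [] []]
  have hdot : PySem.Chars.isspace '.' = false := by decide
  have hsp : PySem.Chars.isspace ' ' = true := by decide
  simp only [PySem.Chars.split₀.go, hdot, hsp, Bool.false_eq_true, if_false, if_true,
    List.isEmpty_cons]
  rw [go_acc cs]
  simp
  omega

lemma go_space_split (b : List Char) : ∀ (a cur : List Char),
    (PySem.Chars.split₀.go (a ++ ' ' :: b) cur []).length
      = (PySem.Chars.split₀.go a cur []).length + wcL b := by
  intro a
  induction a with
  | nil =>
    intro cur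
    have hsp : PySem.Chars.isspace ' ' = true := by decide
    by_cases hc : cur.isEmpty
    · simp only [List.nil_append, PySem.Chars.split₀.go, hsp, hc, if_true]
      simp [wcL, PySem.Chars.split₀]
    · simp only [List.nil_append, PySem.Chars.split₀.go, hsp, hc, Bool.false_eq_true, if_true, if_false]
      rw [go_acc b [] [cur.reverse]]
      simp [wcL, PySem.Chars.split₀]
      omega
  | cons c a ih =>
    intro cur
    by_cases hs : PySem.Chars.isspace c
    · by_cases hc : cur.isEmpty
      · simp only [List.cons_append, PySem.Chars.split₀.go, hs, hc, if_true]
        exact ih []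
      · simp only [List.cons_append, PySem.Chars.split₀.go, hs, hc, Bool.false_eq_true, if_true, if_false]
        rw [go_acc (a ++ ' ' :: b) [] [cur.reverse], go_acc a [] [cur.reverse]]
        rw [List.length_append, List.length_append, ih []]
        omega
    · simp only [List.cons_append, PySem.Chars.split₀.go, hs, Bool.false_eq_true, if_false]
      exact ih (c :: cur)

lemma wcL_append_space (a b : List Char) : wcL (a ++ ' ' :: b) = wcL a + wcL b := by
  unfold wcL PySem.Chars.split₀
  exact go_space_split b a []

lemma wcL_intercalate : ∀ ps : List (List Char),
    wcL (List.intercalate [' '] ps) = (ps.map wcL).sum := by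
  intro ps
  induction ps with
  | nil => simp [List.intercalate, wcL, PySem.Chars.split₀, PySem.Chars.split₀.go]
  | cons a l ih =>
    cases l with
    | nil => simp [List.intercalate]
    | cons b m =>
      have : List.intercalate [' '] (a :: b :: m) = a ++ [' '] ++ List.intercalate [' '] (b :: m) := by
        simp [List.intercalate, List.intersperse]
      rw [this]
      have : a ++ [' '] ++ List.intercalate [' '] (b :: m) = a ++ ' ' :: List.intercalate [' '] (b :: m) := by
        simp
      rw [this, wcL_append_space, ih]
      simp

-- ---- digits of an integer contain no whitespace ----

lemma isspace_digitChar (n : Nat) : PySem.Chars.isspace n.digitChar = false := by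
  match n with
  | 0 => decide
  | 1 => decide
  | 2 => decide
  | 3 => decide
  | 4 => decide
  | 5 => decide
  | 6 => decide
  | 7 => decide
  | 8 => decide
  | 9 => decide
  | 10 => decide
  | 11 => decide
  | 12 => decide
  | 13 => decide
  | 14 => decide
  | 15 => decide
  | n + 16 =>
    have h : (n + 16).digitChar = '*' := by
      unfold Nat.digitChar
      rw [if_neg (by omega), if_neg (by omega), if_neg (by omega), if_neg (by omega),
        if_neg (by omega), if_neg (by omega), if_neg (by omega), if_neg (by omega),
        if_neg (by omega), if_neg (by omega), if_neg (by omega), if_neg (by omega),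
        if_neg (by omega), if_neg (by omega), if_neg (by omega), if_neg (by omega)]
    rw [h]
    decide

lemma toDigitsCore_nonws : ∀ (fuel n : Nat) (ds : List Char),
    (∀ c ∈ ds, PySem.Chars.isspace c = false) →
    ∀ c ∈ Nat.toDigitsCore 10 fuel n ds, PySem.Chars.isspace c = false := by
  intro fuel
  induction fuel with
  | zero => intro n ds hds; simpa [Nat.toDigitsCore] using hds
  | succ fuel ih =>
    intro n ds hds c hc
    simp only [Nat.toDigitsCore] at hc
    by_cases h : n / 10 = 0
    · simp only [h, if_true] at hc
      rcases List.mem_cons.mp hc with h' | h'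
      · subst h'; exact isspace_digitChar _
      · exact hds c h'
    · simp only [h, if_false] at hc
      refine ih (n / 10) (_ :: ds) ?_ c hc
      intro d hd
      rcases List.mem_cons.mp hd with h' | h'
      · subst h'; exact isspace_digitChar _
      · exact hds d h'

lemma toChars_nonws (n : Int) : ∀ c ∈ PySem.Int.toChars n, PySem.Chars.isspace c = false := by
  intro c hc
  unfold PySem.Int.toChars at hc
  split at hc
  · rcases List.mem_cons.mp hc with h' | h'
    · subst h'; decide
    · exact toDigitsCore_nonws _ _ [] (by simp) c h'
  · exact toDigitsCore_nonws _ _ [] (by simp) c hc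

-- ---- token counts of the concrete parts ----

lemma wcL_part (i : Nat) : wcL (pvPart i).toList = tokN i := by
  have hlist : (pvPart i).toList
      = PySem.Int.toChars ((i : Int) + 1) ++ '.' :: ' ' ::
        ((pvClausesA.getD (i % 5) "").toList ++ ['\n']) := by
    simp [pvPart, String.toList_append, PySem.Int.toList_toStr]
  rw [hlist, wcL_word_dot _ _ (toChars_nonws _)]
  rcases (by omega : i % 5 = 0 ∨ i % 5 = 1 ∨ i % 5 = 2 ∨ i % 5 = 3 ∨ i % 5 = 4) with h | h | h | h | h <;>
    rw [tokN, h] <;> simp only [pvClausesA, List.getD] <;> decide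

lemma str_split_len (s : String) :
    (PySem.Str.split₀ s).length = wcL s.toList := by
  rw [wcL, ← PySem.Str.split₀_map_toList, List.length_map]

lemma count_partsK (k : Nat) : pvCountA (pvPartsK k) = ((13 + cumN k : Nat) : Int) := by
  have hjoin : (PySem.Str.join " " (pvPartsK k)).toList
      = List.intercalate [' '] ((pvPartsK k).map String.toList) := by
    rw [PySem.Str.toList_join]
    rfl
  unfold pvCountA
  rw [str_split_len, hjoin, wcL_intercalate]
  have h1 : wcL "MASTER SERVICES AGREEMENT\n\n".toList = 3 := by decide
  have h2 : wcL "This Agreement is made between Alpha Corp and Beta LLC.\n\n".toList = 10 := by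
    decide
  have hpt : (List.range k).map (fun i => wcL (String.toList (pvPart i)))
      = (List.range k).map (fun i => tokN i) :=
    List.map_congr_left (fun i _ => wcL_part i)
  have hsum : ∀ k : Nat, ((List.range k).map (fun i => tokN i)).sum = cumN k := by
    intro k
    induction k with
    | zero => simp [cumN]
    | succ k ih => rw [List.range_succ]; simp [ih, cumN]
  simp only [pvPartsK, pvPartsInitA, List.map_append, List.map_map, List.map_cons,
    List.map_nil, List.sum_append, List.sum_cons, List.sum_nil, Function.comp_def]
  rw [h1, h2, hpt, hsum]
  push_cast
  omega

-- ---- the A loop computes pvPartsK (pvKN target) ----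

lemma partsK_succ (k : Nat) : pvPartsK (k + 1) = pvPartsK k ++ [pvPart k] := by
  unfold pvPartsK
  rw [List.range_succ]
  simp

lemma loopA_eq (target : Int) : ∀ (fuel k : Nat), pvKN target ≤ k + fuel → k ≤ pvKN target →
    pvLoopA target fuel (pvPartsK k) (k : Int) ((13 + cumN k : Nat) : Int) = pvPartsK (pvKN target) := by
  intro fuel
  induction fuel with
  | zero =>
    intro k h1 h2
    have : k = pvKN target := by omega
    subst this
    rfl
  | succ fuel ih =>
    intro k h1 h2
    by_cases hc : ((13 + cumN k : Nat) : Int) < target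
    · have hk : k < pvKN target := by
        by_contra h
        have hmono := cumN_mono (show pvKN target ≤ k by omega)
        have hspec := Nat.find_spec (pvKNex target)
        change target ≤ 13 + (cumN (pvKN target) : Int) at hspec
        push_cast at hc
        omega
      have hstep : pvPartsK k ++
          [PySem.Int.toStr ((k : Int) + 1) ++ ". " ++
            PySem.List.pyGetD pvClausesA (PySem.Int.mod (k : Int) (pvClausesA.length : Int)) "" ++ "\n"]
          = pvPartsK (k + 1) := by
        rw [partsK_succ]
        congr 2
        unfold pvPart
        congr 2
        have hlen : (pvClausesA.length : Int) = ((5 : Nat) : Int) := by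
          simp [pvClausesA]
        rw [hlen, PySem.Int.mod_natCast, PySem.List.pyGetD_natCast]
      simp only [pvLoopA, hc, if_true]
      rw [hstep, count_partsK (k + 1)]
      have hcast : (k : Int) + 1 = ((k + 1 : Nat) : Int) := by push_cast; ring
      rw [hcast]
      exact ih (k + 1) (by omega) (by omega)
    · have hk : pvKN target ≤ k := by
        apply Nat.find_min'
        change target ≤ 13 + (cumN k : Int)
        push_cast at hc ⊢
        omega
      have : k = pvKN target := by omega
      subst this
      simp only [pvLoopA, hc, if_false]

lemma pvKN_le_toNat (t : Int) : pvKN t ≤ t.toNat + 1 := by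
  have : pvKN t ≤ t.toNat := by
    apply Nat.find_min'
    change t ≤ 13 + (cumN t.toNat : Int)
    have := cumN_ge t.toNat
    omega
  omega

lemma genA_eq (t : Int) :
    generate_legal_text t
      = PySem.Str.join "" (pvPartsK (pvKN t) ++ ["\nIN WITNESS WHEREOF, the parties execute this Agreement.\n"]) := by
  unfold generate_legal_text
  have h0 : pvPartsInitA = pvPartsK 0 := by simp [pvPartsK]
  have hc : pvCountA pvPartsInitA = ((13 + cumN 0 : Nat) : Int) := by
    rw [h0]; exact count_partsK 0
  rw [hc, h0]
  have h00 : (0 : Int) = ((0 : Nat) : Int) := by simp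
  rw [h00, loopA_eq t (t.toNat + 1) 0 (by have := pvKN_le_toNat t; omega) (by omega)]

-- ---- B computes the same clause count ----

lemma KB_eq (t : Int) : pvKB t = ((pvKN t : Nat) : Int) := by
  have hinit : ((PySem.Str.split₀ pvHeaderB).length : Int) = 13 := by decide
  have htok : pvTokB = [14, 11, 12, 12, 9] := by decide
  unfold pvKB
  rw [hinit, htok]
  by_cases hle : t - 13 ≤ 0
  · simp only [hle, if_true]
    have : pvKN t = 0 := by
      have : pvKN t ≤ 0 := by
        apply Nat.find_min'
        change t ≤ 13 + (cumN 0 : Int)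
        simp [cumN]; omega
      omega
    simp [this]
  · simp only [hle, if_false]
    have hsum : List.sum [(14 : Int), 11, 12, 12, 9] = 58 := by decide
    rw [hsum]
    set N : Int := t - 13 - 1 with hN
    have hN0 : 0 ≤ N := by omega
    have hq : PySem.Int.floordiv N 58 = N / 58 := PySem.Int.floordiv_eq_ediv_of_pos (by omega)
    have hr : PySem.Int.mod N 58 = N % 58 := PySem.Int.mod_eq_emod_of_pos (by omega)
    rw [hq, hr]
    set q : Int := N / 58 with hqdef
    set r : Int := N % 58 + 1 with hrdef
    have hq0 : 0 ≤ q := by positivity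
    have hrb : 1 ≤ r ∧ r ≤ 58 := by
      constructor
      · have := Int.emod_nonneg N (show (58:Int) ≠ 0 by norm_num); omega
      · have := Int.emod_lt_of_pos N (show (0:Int) < 58 by norm_num); omega
    have hneed : t - 13 = 58 * q + r := by
      have := Int.ediv_add_emod N 58
      omega
    -- the find characterisation: pvKN t = 5 * q.toNat + m  where m is picked by the chain
    have hfind : ∀ (m : Nat), 1 ≤ m → m ≤ 5 →
        ((r : Int) ≤ (cumN m : Nat)) → ¬ ((r : Int) ≤ (cumN (m - 1) : Nat)) →
        pvKN t = 5 * q.toNat + m := by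
      intro m hm1 hm5 hup hlo
      have hqcast : ((q.toNat : Nat) : Int) = q := Int.toNat_of_nonneg hq0
      unfold pvKN
      apply le_antisymm
      · apply Nat.find_min'
        change t ≤ 13 + (cumN (5 * q.toNat + m) : Int)
        rw [cumN_5q_add q.toNat m hm5]
        push_cast
        rw [hqcast] at *
        push_cast at hup
        omega
      · rw [Nat.le_find_iff]
        intro j hj
        change ¬ (t ≤ 13 + (cumN j : Int))
        have hjle : j ≤ 5 * q.toNat + (m - 1) := by omega
        have hmono := cumN_mono hjle
        have hcum : cumN (5 * q.toNat + (m - 1)) = 58 * q.toNat + cumN (m - 1) :=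
          cumN_5q_add q.toNat (m - 1) (by omega)
        push_cast at hlo
        have : ((cumN j : Nat) : Int) ≤ 58 * q + ((cumN (m - 1) : Nat) : Int) := by
          rw [← hqcast]
          push_cast
          omega
        omega
    -- evaluate the pick chain
    have hc1 : cumN 1 = 14 := by decide
    have hc2 : cumN 2 = 25 := by decide
    have hc3 : cumN 3 = 37 := by decide
    have hc4 : cumN 4 = 49 := by decide
    have hc5 : cumN 5 = 58 := by decide
    have hc0 : cumN 0 = 0 := by decide
    by_cases h1 : r ≤ 0 + 14
    · simp only [pvPickB, (by omega : r ≤ (0:Int) + 14), if_true]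
      rw [hfind 1 (by omega) (by omega) (by rw [hc1]; push_cast; omega)
        (by simp only [Nat.sub_self, hc0]; push_cast; omega)]
      push_cast [Int.toNat_of_nonneg hq0]
      ring
    · by_cases h2 : r ≤ 25
      · simp only [pvPickB, if_neg (by omega : ¬ (r ≤ (0:Int) + 14)), if_pos (by omega : r ≤ (0:Int) + 14 + 11)]
        rw [hfind 2 (by omega) (by omega) (by rw [hc2]; push_cast; omega)
          (by simp only [(by omega : 2 - 1 = 1), hc1]; push_cast; omega)]
        push_cast [Int.toNat_of_nonneg hq0]
        ring
      · by_cases h3 : r ≤ 37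
        · simp only [pvPickB, if_neg (by omega : ¬ (r ≤ (0:Int) + 14)),
            if_neg (by omega : ¬ (r ≤ (0:Int) + 14 + 11)), if_pos (by omega : r ≤ (0:Int) + 14 + 11 + 12)]
          rw [hfind 3 (by omega) (by omega) (by rw [hc3]; push_cast; omega)
            (by simp only [(by omega : 3 - 1 = 2), hc2]; push_cast; omega)]
          push_cast [Int.toNat_of_nonneg hq0]
          ring
        · by_cases h4 : r ≤ 49
          · simp only [pvPickB, if_neg (by omega : ¬ (r ≤ (0:Int) + 14)),
              if_neg (by omega : ¬ (r ≤ (0:Int) + 14 + 11)),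
              if_neg (by omega : ¬ (r ≤ (0:Int) + 14 + 11 + 12)),
              if_pos (by omega : r ≤ (0:Int) + 14 + 11 + 12 + 12)]
            rw [hfind 4 (by omega) (by omega) (by rw [hc4]; push_cast; omega)
              (by simp only [(by omega : 4 - 1 = 3), hc3]; push_cast; omega)]
            push_cast [Int.toNat_of_nonneg hq0]
            ring
          · simp only [pvPickB, if_neg (by omega : ¬ (r ≤ (0:Int) + 14)),
              if_neg (by omega : ¬ (r ≤ (0:Int) + 14 + 11)),
              if_neg (by omega : ¬ (r ≤ (0:Int) + 14 + 11 + 12)),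
              if_neg (by omega : ¬ (r ≤ (0:Int) + 14 + 11 + 12 + 12)),
              if_pos (by omega : r ≤ (0:Int) + 14 + 11 + 12 + 12 + 9)]
            rw [hfind 5 (by omega) (by omega) (by rw [hc5]; push_cast; omega)
              (by simp only [(by omega : 5 - 1 = 4), hc4]; push_cast; omega)]
            push_cast [Int.toNat_of_nonneg hq0]
            ring

lemma genB_eq (t : Int) :
    generate_legal_text_alt t
      = PySem.Str.join "" (([pvHeaderB] ++ (List.range (pvKN t)).map pvPart)
          ++ ["\nIN WITNESS WHEREOF, the parties execute this Agreement.\n"]) := by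
  show PySem.Str.join "" (([pvHeaderB] ++
      (PySem.List.pyRange 0 (pvKB t)).map (fun i =>
        PySem.Int.toStr (i + 1) ++ ". " ++
          PySem.List.pyGetD pvClausesB (PySem.Int.mod i 5) "" ++ "\n"))
      ++ ["\nIN WITNESS WHEREOF, the parties execute this Agreement.\n"]) = _
  rw [KB_eq]
  congr 2
  rw [PySem.List.pyRange_zero_natCast]
  rw [List.map_map]
  congr 1
  apply List.map_congr_left
  intro i _
  unfold pvPart
  simp only [Function.comp_def]
  congr 2
  have h5 : (5 : Int) = ((5 : Nat) : Int) := by simp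
  rw [h5, PySem.Int.mod_natCast, PySem.List.pyGetD_natCast]
  rfl

-- ---- gluing: "".join ignores how the header is split ----

lemma flatten_intersperse_nil : ∀ l : List (List Char),
    (List.intersperse ([] : List Char) l).flatten = l.flatten := by
  intro l
  induction l with
  | nil => simp
  | cons a l ih =>
    cases l with
    | nil => simp
    | cons b m =>
      simp only [List.intersperse] at *
      simp only [List.flatten_cons] at *
      simp [ih]

lemma join_empty_toList (parts : List String) :
    (PySem.Str.join "" parts).toList = (parts.map String.toList).flatten := by
  rw [PySem.Str.toList_join]
  show List.intercalate "".toList (parts.map String.toList) = _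
  have : "".toList = ([] : List Char) := rfl
  rw [this]
  unfold List.intercalate
  exact flatten_intersperse_nil _

-- ===== VERDICT (by name: the statement is the Claim_ definition above) =====
theorem generate_legal_text_spec : Claim_equal_generate_legal_text := by
  intro t _
  unfold Spec_generate_legal_text
  rw [genA_eq, genB_eq]
  apply String.toList_inj.mp
  rw [join_empty_toList, join_empty_toList]
  unfold pvPartsK pvPartsInitA
  simp only [List.map_append, List.flatten_append, List.map_cons, List.map_nil,
    List.flatten_cons, List.flatten_nil]
  have : pvHeaderB.toList
      = "MASTER SERVICES AGREEMENT\n\n".toList ++ "This Agreement is made between Alpha Corp and Beta LLC.\n\n".toList := by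
    decide
  rw [this]
  simp
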